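-- pv_equiv track=rewrite | github.com/warlockee/oxRL | preprocessing/math_hard.py | extract_solution
-- ===== SOURCE A (Python) =====
-- def extract_solution(solution_str):
--     '''
--        This extracts the content within \\boxed{} from the solution string.
--        Handles nested braces within \\boxed{}.
--     '''
--     # Find \boxed{ and then match balanced braces
--     idx = solution_str.rfind("\\boxed{")
--     if idx == -1:
--         # Fallback: return the full solution string stripped
--         return solution_str.strip()
--
--     # Walk forward from the opening brace to find the matching close
--     start = idx + len("\\boxed{")
--     depth = 1
--     i = start
--     while i < len(solution_str) and depth > 0:
--         if solution_str[i] == '{':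
--             depth += 1
--         elif solution_str[i] == '}':
--             depth -= 1
--         i += 1
--
--     result = solution_str[start:i - 1]
--     return result.strip()
-- ===== SOURCE B (Python) =====
-- def extract_solution(solution_str):
--     '''
--        This extracts the content within \\boxed{} from the solution string.
--        Handles nested braces within \\boxed{}.
--     '''
--     idx = solution_str.rfind("\\boxed{")
--     if idx == -1:
--         return solution_str.strip()
--     tail = solution_str[idx + len("\\boxed{"):]
--     # Build the running brace-depth table over the tail, then cut at the
--     # first point where the depth returns to zero (the matching close brace).
--     depths = []
--     depth = 1
--     for c in tail:
--         depth += (c == '{') - (c == '}')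
--         depths.append(depth)
--     if 0 in depths:
--         return tail[:depths.index(0)].strip()
--     # No matching close brace: return the whole tail.
--     return tail.strip()
-- ===== Notes on version B (the rewrite author's own statement) =====
-- stated objective: alternative
-- what changed: A's incremental while-loop brace walk (depth counter plus moving cursor) is replaced by a two-pass decomposition: build the full running brace-depth table over the tail, then cut it at the first index where the depth hits zero; with no matching close brace B returns the whole tail.
-- intended difference: On inputs whose last \boxed{ is never closed by a matching brace and whose tail ends in a non-whitespace character, A returns the tail with its last character silently dropped (the cursor overruns and the slice end is i-1), while B returns the whole stripped tail, which is the intended value. — e.g. on extract_solution("\\boxed{ab"): A returns "a", B returns "ab"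
import Mathlib
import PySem

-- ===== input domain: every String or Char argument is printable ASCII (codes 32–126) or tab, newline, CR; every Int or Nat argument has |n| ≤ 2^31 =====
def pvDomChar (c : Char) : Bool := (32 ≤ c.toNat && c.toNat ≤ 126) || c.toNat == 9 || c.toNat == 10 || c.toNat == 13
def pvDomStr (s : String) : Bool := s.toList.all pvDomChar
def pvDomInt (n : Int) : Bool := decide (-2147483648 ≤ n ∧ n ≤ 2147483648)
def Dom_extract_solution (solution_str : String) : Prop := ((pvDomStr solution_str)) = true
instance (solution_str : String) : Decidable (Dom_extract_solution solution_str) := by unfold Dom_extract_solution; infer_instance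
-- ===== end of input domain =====

-- B replaces A's incremental while-loop brace walk by a two-pass decomposition (build the running
-- brace-depth table, then cut at its first zero); on an unclosed \boxed{ B returns the whole tail
-- where A drops the tail's last character (stated below as the intended difference D_).

-- ===== PORT A =====
-- A's while loop 'while i < len(s) and depth > 0: …; i += 1', walking the suffix s[i:]
-- (rest = s[i:], so 'i < len(s)' is 'rest ≠ []'); returns the final i.
def aWalk : List Char → Int → Int → Int
  | [], _, i => i
  | c :: rest, depth, i =>
    if depth > 0 then
      aWalk rest (if c = '{' then depth + 1 else if c = '}' then depth - 1 else depth) (i + 1)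
    else i

def extract_solution (solution_str : String) : String :=
  let s := solution_str.toList
  let idx := PySem.Chars.rfind s "\\boxed{".toList
  if idx = -1 then
    String.ofList (PySem.Chars.strip s)
  else
    -- start = idx + len("\boxed{") = idx + 7
    let start := idx + 7
    -- the loop reads s[i] for i = start, start+1, …: walk the suffix s[start:]
    -- (idx ≥ 0 in this branch, so s.drop start.toNat is exactly that suffix)
    let i := aWalk (s.drop start.toNat) 1 start
    String.ofList (PySem.Chars.strip (PySem.List.slice s (some start) (some (i - 1))))

-- ===== PORT B =====
def extract_solution_alt (solution_str : String) : String :=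
  let s := solution_str.toList
  let idx := PySem.Chars.rfind s "\\boxed{".toList
  if idx = -1 then
    String.ofList (PySem.Chars.strip s)
  else
    -- tail = solution_str[idx + len("\boxed{"):] (idx ≥ 0 in this branch)
    let tail := PySem.List.slice s (some (idx + 7)) none
    -- first pass: 'for c in tail: depth += (c=='{') - (c=='}'); depths.append(depth)'
    let st := tail.foldl
      (fun (p : List Int × Int) c =>
        let d := p.2 + (if c = '{' then (1 : Int) else if c = '}' then -1 else 0)
        (p.1 ++ [d], d))
      ([], 1)
    -- second pass: 'if 0 in depths: return tail[:depths.index(0)].strip()' else whole tail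
    match PySem.List.index? st.1 (0 : Int) with
    | some k => String.ofList (PySem.Chars.strip (PySem.List.slice tail none (some (k : Int))))
    | none => String.ofList (PySem.Chars.strip tail)

-- ===== PRECONDITION & SPEC =====
-- On inputs whose last \boxed{ is never closed (no prefix of the tail balances the brace) and whose
-- tail ends in a non-whitespace character, A returns the tail with its last character silently
-- dropped (its cursor overruns and the slice end is i-1), while B returns the whole stripped tail,
-- the intended value.
def D_extract_solution (solution_str : String) : Prop :=
  let L := solution_str.toList
  let t := L.drop (PySem.Chars.rfind L "\\boxed{".toList + 7).toNat
  PySem.Chars.rfind L "\\boxed{".toList ≠ -1 ∧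
  t.getLast?.any (fun c => !PySem.Chars.isspace c) = true ∧
  ∀ p ≤ t.length, (t.take p).count '}' ≤ (t.take p).count '{' 
instance (solution_str : String) : Decidable (D_extract_solution solution_str) := by
  unfold D_extract_solution; infer_instance

def Spec_extract_solution (solution_str : String) (out : String) : Prop :=
  ¬ D_extract_solution solution_str → out = extract_solution_alt solution_str
instance (solution_str : String) (out : String) : Decidable (Spec_extract_solution solution_str out) := by
  unfold Spec_extract_solution; infer_instance

def pvDiffWitness_extract_solution : String := "\\boxed{ab"
def pvDiffWitnessOut_extract_solution : String × String := ("a", "ab")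

-- ===== CLAIM (what is proved, stated in full; the proofs are below) =====
def Claim_unchanged_extract_solution : Prop := ∀ (solution_str : String), Dom_extract_solution solution_str → Spec_extract_solution solution_str (extract_solution solution_str)
def Claim_changed_extract_solution : Prop := Dom_extract_solution (pvDiffWitness_extract_solution) ∧ D_extract_solution (pvDiffWitness_extract_solution) ∧ extract_solution (pvDiffWitness_extract_solution) = pvDiffWitnessOut_extract_solution.1 ∧ extract_solution_alt (pvDiffWitness_extract_solution) = pvDiffWitnessOut_extract_solution.2 ∧ pvDiffWitnessOut_extract_solution.1 ≠ pvDiffWitnessOut_extract_solution.2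
def Claim_exact_extract_solution : Prop := ∀ (solution_str : String), Dom_extract_solution solution_str → D_extract_solution solution_str → extract_solution solution_str ≠ extract_solution_alt solution_str

-- ===== LEMMAS AND PROOFS =====

-- rfind returns -1 or a nonnegative index
theorem rfind_go_cases (s sub : List Char) (n : Nat) :
    PySem.Chars.rfind.go s sub n = -1 ∨ 0 ≤ PySem.Chars.rfind.go s sub n := by
  induction n with
  | zero => unfold PySem.Chars.rfind.go; split <;> simp
  | succ j ih =>
    unfold PySem.Chars.rfind.go
    split
    · right; positivity
    · exact ih

theorem rfind_nonneg {s sub : List Char} (h : PySem.Chars.rfind s sub ≠ -1) :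
    0 ≤ PySem.Chars.rfind s sub := by
  have hc := rfind_go_cases s sub s.length
  unfold PySem.Chars.rfind at *
  rcases hc with h' | h'
  · exact absurd h' h
  · exact h'

-- the depth step both programs perform on one character
def bump (d : Int) (c : Char) : Int :=
  d + (if c = '{' then (1 : Int) else if c = '}' then -1 else 0)

theorem bump_eq (d : Int) (c : Char) :
    (if c = '{' then d + 1 else if c = '}' then d - 1 else d) = bump d c := by
  unfold bump; split_ifs <;> ring

theorem bump_lb (d : Int) (c : Char) : d - 1 ≤ bump d c := by
  unfold bump; split_ifs <;> omega

-- number of characters A's while loop consumes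
def consume : List Char → Int → Nat
  | [], _ => 0
  | c :: rest, d => if d > 0 then consume rest (bump d c) + 1 else 0

theorem aWalk_eq (t : List Char) : ∀ (d i : Int), aWalk t d i = i + consume t d := by
  induction t with
  | nil => intro d i; simp [aWalk, consume]
  | cons c rest ih =>
    intro d i
    by_cases h : d > 0
    · simp only [aWalk, consume, if_pos h, bump_eq, ih]
      push_cast; ring
    · simp [aWalk, consume, h]

theorem consume_nonpos (t : List Char) (d : Int) (h : ¬ d > 0) : consume t d = 0 := by
  cases t <;> simp [consume, h]

-- the running-depth table B builds
def depthsOf : List Char → Int → List Int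
  | [], _ => []
  | c :: rest, d => bump d c :: depthsOf rest (bump d c)

-- final depth of B's fold (second accumulator component)
def dEnd : List Char → Int → Int
  | [], d => d
  | c :: rest, d => dEnd rest (bump d c)

theorem bFold_eq (t : List Char) : ∀ (acc : List Int) (d : Int),
    t.foldl
      (fun (p : List Int × Int) c =>
        (p.1 ++ [p.2 + (if c = '{' then (1 : Int) else if c = '}' then -1 else 0)],
         p.2 + (if c = '{' then (1 : Int) else if c = '}' then -1 else 0)))
      (acc, d) = (acc ++ depthsOf t d, dEnd t d) := by
  induction t with
  | nil => intro acc d; simp [depthsOf, dEnd]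
  | cons c rest ih =>
    intro acc d
    simp only [List.foldl_cons, depthsOf, dEnd, ih]
    simp [bump]

theorem consume_of_index_some (t : List Char) : ∀ (d : Int) (k : Nat), 0 < d →
    PySem.List.index? (depthsOf t d) (0 : Int) = some k → consume t d = k + 1 := by
  induction t with
  | nil =>
    intro d k _ h
    rw [show depthsOf [] d = [] from rfl,
      (PySem.List.index?_eq_none_iff ([] : List Int) 0).mpr (by simp)] at h
    cases h
  | cons c rest ih =>
    intro d k hd h
    simp only [depthsOf] at h
    have hstep : consume (c :: rest) d = consume rest (bump d c) + 1 := by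
      simp [consume, hd]
    by_cases hz : bump d c = 0
    · rw [hz, PySem.List.index?_cons_self] at h
      have hk : k = 0 := by injection h with h'; omega
      rw [hstep, consume_nonpos rest (bump d c) (by omega), hk]
    · rw [PySem.List.index?_cons_of_ne _ hz] at h
      rcases Option.map_eq_some_iff.mp h with ⟨k', hk', rfl⟩
      have hd' : 0 < bump d c := by have := bump_lb d c; omega
      rw [hstep, ih (bump d c) k' hd' hk']

theorem consume_of_index_none (t : List Char) : ∀ (d : Int), 0 < d →
    PySem.List.index? (depthsOf t d) (0 : Int) = none → consume t d = t.length := by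
  induction t with
  | nil => intro d _ _; simp [consume]
  | cons c rest ih =>
    intro d hd h
    simp only [depthsOf] at h
    by_cases hz : bump d c = 0
    · rw [hz, PySem.List.index?_cons_self] at h
      exact absurd h (by simp)
    · rw [PySem.List.index?_cons_of_ne _ hz] at h
      have h' : PySem.List.index? (depthsOf rest (bump d c)) (0 : Int) = none :=
        Option.map_eq_none_iff.mp h
      have hd' : 0 < bump d c := by have := bump_lb d c; omega
      simp [consume, hd, ih (bump d c) hd' h']

-- running balance of a prefix
def bal (u : List Char) : Int := (u.count '{' : Int) - (u.count '}' : Int)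

theorem bal_nil : bal [] = 0 := by simp [bal]

theorem bump_split (d : Int) (c : Char) : bump d c = d + bump 0 c := by unfold bump; ring

theorem bal_cons (c : Char) (u : List Char) : bal (c :: u) = bump 0 c + bal u := by
  unfold bal bump
  by_cases h1 : c = '{' <;> by_cases h2 : c = '}' <;>
    simp [h1, h2] <;> ring

-- the depth table has a zero iff some prefix of the tail brings the depth to zero
theorem zero_mem_depthsOf_iff (t : List Char) : ∀ (d : Int),
    ((0 : Int) ∈ depthsOf t d ↔ ∃ p, p < t.length ∧ d + bal (t.take (p + 1)) = 0) := by
  induction t with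
  | nil => intro d; simp [depthsOf]
  | cons c rest ih =>
    intro d
    simp only [depthsOf, List.mem_cons, ih (bump d c)]
    constructor
    · rintro (h | ⟨p, hp, hb⟩)
      · refine ⟨0, by simp, ?_⟩
        simp only [List.take_succ_cons, List.take_zero, bal_cons, bal_nil, add_zero]
        rw [bump_split] at h
        omega
      · refine ⟨p + 1, by simpa using Nat.succ_lt_succ hp, ?_⟩
        simp only [List.take_succ_cons, bal_cons] at *
        unfold bump at *; omega
    · rintro ⟨p, hp, hb⟩
      cases p with
      | zero =>
        left
        simp only [List.take_succ_cons, List.take_zero, bal_cons, bal_nil, add_zero] at hb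
        rw [bump_split]
        omega
      | succ q =>
        right
        refine ⟨q, by simpa using Nat.lt_of_succ_lt_succ hp, ?_⟩
        simp only [List.take_succ_cons, bal_cons] at hb
        unfold bump at *; omega

-- with no zero in the depth table every prefix depth stays positive
theorem pos_of_no_zero (t : List Char) : ∀ (d : Int), 0 < d → (0 : Int) ∉ depthsOf t d →
    ∀ p, p ≤ t.length → 0 < d + bal (t.take p) := by
  induction t with
  | nil => intro d hd _ p _; simp [bal_nil]; omega
  | cons c rest ih =>
    intro d hd hmem p hp
    simp only [depthsOf, List.mem_cons, not_or] at hmem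
    obtain ⟨h1, h2⟩ := hmem
    have hb : 0 < bump d c := by have := bump_lb d c; omega
    cases p with
    | zero => simpa [bal_nil] using hd
    | succ q =>
      have hq := ih (bump d c) hb h2 q (by simpa using hp)
      simp only [List.take_succ_cons, bal_cons]
      rw [bump_split] at hq
      omega

-- D_'s balance condition says exactly that B's depth table has no zero
theorem index?_none_iff_D (t : List Char) :
    PySem.List.index? (depthsOf t 1) (0 : Int) = none ↔
      ∀ p ≤ t.length, (t.take p).count '}' ≤ (t.take p).count '{' := by
  rw [PySem.List.index?_eq_none_iff]
  constructor
  · intro h p hp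
    have := pos_of_no_zero t 1 one_pos h p hp
    unfold bal at this; omega
  · intro h hmem
    obtain ⟨p, hp, hb⟩ := (zero_mem_depthsOf_iff t 1).mp hmem
    have := h (p + 1) (by omega)
    unfold bal at hb; omega

-- appending a whitespace character does not change strip
theorem rstrip_append_space {c : Char} (hc : PySem.Chars.isspace c = true) (v : List Char) :
    PySem.Chars.rstrip (v ++ [c]) = PySem.Chars.rstrip v := by
  unfold PySem.Chars.rstrip
  simp [hc]

theorem strip_append_space {c : Char} (hc : PySem.Chars.isspace c = true) (u : List Char) :
    PySem.Chars.strip (u ++ [c]) = PySem.Chars.strip u := by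
  unfold PySem.Chars.strip PySem.Chars.lstrip
  rw [List.dropWhile_append]
  by_cases he : (List.dropWhile PySem.Chars.isspace u).isEmpty
  · simp only [he, if_pos]
    rw [List.isEmpty_iff.mp he]
    simp [hc]
  · simp only [he, if_neg, Bool.false_eq_true, not_false_iff]
    exact rstrip_append_space hc _

-- appending a non-whitespace character: strip keeps it, and the result is longer than strip u
theorem strip_append_nonspace {c : Char} (hc : PySem.Chars.isspace c = false) (u : List Char) :
    PySem.Chars.strip (u ++ [c]) = PySem.Chars.lstrip u ++ [c] := by
  have hr : ∀ w : List Char, PySem.Chars.rstrip (w ++ [c]) = w ++ [c] := by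
    intro w
    unfold PySem.Chars.rstrip
    simp [hc]
  unfold PySem.Chars.strip PySem.Chars.lstrip
  rw [List.dropWhile_append]
  by_cases he : (List.dropWhile PySem.Chars.isspace u).isEmpty
  · simp only [he, if_pos]
    rw [List.isEmpty_iff.mp he]
    simpa [List.dropWhile_cons, hc] using hr []
  · simp only [he, if_neg, Bool.false_eq_true, not_false_iff]
    exact hr _

theorem length_strip_le (u : List Char) :
    (PySem.Chars.strip u).length ≤ (PySem.Chars.lstrip u).length := by
  unfold PySem.Chars.strip PySem.Chars.rstrip
  simpa using List.length_dropWhile_le PySem.Chars.isspace (PySem.Chars.lstrip u).reverse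

-- both ports in the non-fallback branch, in one shared normal form
theorem ports_branch (s : String) (h : PySem.Chars.rfind s.toList "\\boxed{".toList ≠ -1) :
    extract_solution s =
      String.ofList (PySem.Chars.strip
        ((s.toList.drop (PySem.Chars.rfind s.toList "\\boxed{".toList + 7).toNat).take
          (consume (s.toList.drop (PySem.Chars.rfind s.toList "\\boxed{".toList + 7).toNat) 1 - 1))) ∧
    extract_solution_alt s =
      (match PySem.List.index? (depthsOf (s.toList.drop (PySem.Chars.rfind s.toList "\\boxed{".toList + 7).toNat) 1) (0 : Int) with
       | some k => String.ofList (PySem.Chars.strip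
            (PySem.List.slice (s.toList.drop (PySem.Chars.rfind s.toList "\\boxed{".toList + 7).toNat) none (some (k : Int))))
       | none => String.ofList (PySem.Chars.strip
            (s.toList.drop (PySem.Chars.rfind s.toList "\\boxed{".toList + 7).toNat))) := by
  have h0 : 0 ≤ PySem.Chars.rfind s.toList "\\boxed{".toList := rfind_nonneg h
  set L := s.toList with hL
  set idx := PySem.Chars.rfind L "\\boxed{".toList with hidx
  have htail := PySem.List.slice_from (xs := L) (a := idx + 7) (by omega)
  constructor
  · simp only [extract_solution, ← hL, ← hidx, if_neg h]
    rw [aWalk_eq]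
    set T := L.drop (idx + 7).toNat with hT
    set n := consume T 1 with hn
    have hsl : PySem.List.slice L (some (idx + 7)) (some (idx + 7 + (n : Int) - 1)) =
        T.take (n - 1) := by
      rw [PySem.List.slice_toNat L (by omega) (by omega), hT]
      congr 1
      omega
    rw [hsl]
  · simp only [extract_solution_alt, ← hL, ← hidx, if_neg h, htail, bFold_eq, List.nil_append]

-- ===== VERDICT (by name: the statements are the Claim_ definitions above) =====
theorem extract_solution_spec : Claim_unchanged_extract_solution := by
  intro s _hdom hnd
  show extract_solution s = extract_solution_alt s
  by_cases h : PySem.Chars.rfind s.toList "\\boxed{".toList = -1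
  · simp only [extract_solution, extract_solution_alt, if_pos h]
  · obtain ⟨hA, hB⟩ := ports_branch s h
    set idx := PySem.Chars.rfind s.toList "\\boxed{".toList with hidx
    set T := s.toList.drop (idx + 7).toNat with hT
    rcases hz : PySem.List.index? (depthsOf T 1) (0 : Int) with _ | k
    · -- no zero in the depth table: A takes T.length - 1 chars, B the whole tail
      simp only [hz] at hB
      rw [hA, hB]
      have hlen : consume T 1 = T.length := consume_of_index_none T 1 one_pos hz
      rw [hlen]
      -- ¬D with idx ≠ -1 and the balance condition forces T = [] or a whitespace last char
      have hbal := (index?_none_iff_D T).mp hz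
      by_cases hnil : T = []
      · rw [hnil]; rfl
      · have hws : PySem.Chars.isspace (T.getLast hnil) = true := by
          by_contra hws'
          apply hnd
          refine ⟨h, ?_, hbal⟩
          rw [List.getLast?_eq_some_getLast hnil]
          simpa [Option.any] using hws'
        have hdecomp : T.dropLast ++ [T.getLast hnil] = T := List.dropLast_append_getLast hnil
        conv_rhs => rw [← hdecomp]
        rw [strip_append_space hws, ← List.dropLast_eq_take]
    · simp only [hz] at hB
      rw [hA, hB]
      have hk : consume T 1 = k + 1 := consume_of_index_some T 1 k one_pos hz
      rw [hk]
      simp [PySem.List.slice_to_natCast]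

theorem extract_solution_changed : Claim_changed_extract_solution := by
  unfold Claim_changed_extract_solution; decide

theorem extract_solution_tight : Claim_exact_extract_solution := by
  intro s _hdom hd
  obtain ⟨h, hany, hbal⟩ := hd
  obtain ⟨hA, hB⟩ := ports_branch s h
  set idx := PySem.Chars.rfind s.toList "\\boxed{".toList with hidx
  set T := s.toList.drop (idx + 7).toNat with hT
  have hnil : T ≠ [] := by
    intro he
    rw [he] at hany
    simp [Option.any] at hany
  have hws : PySem.Chars.isspace (T.getLast hnil) = false := by
    rw [List.getLast?_eq_some_getLast hnil] at hany
    simpa [Option.any] using hany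
  have hz : PySem.List.index? (depthsOf T 1) (0 : Int) = none :=
    (index?_none_iff_D T).mpr hbal
  simp only [hz] at hB
  rw [hA, hB, consume_of_index_none T 1 one_pos hz]
  intro heq
  have heq' : PySem.Chars.strip (T.take (T.length - 1)) = PySem.Chars.strip T := by
    have := congrArg String.toList heq
    simpa using this
  have hdecomp : T.dropLast ++ [T.getLast hnil] = T := List.dropLast_append_getLast hnil
  rw [← List.dropLast_eq_take] at heq'
  conv_rhs at heq' => rw [← hdecomp]
  rw [strip_append_nonspace hws T.dropLast] at heq'
  have hle := length_strip_le T.dropLast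
  have := congrArg List.length heq'
  simp at this
  omega
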